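-- pv_equiv track=rewrite | github.com/sunilsoni/interview-notes-python | com/interview/2024/oct/box_fits.py | solution
-- ===== SOURCE A (Python) =====
-- def solution(operations):
--     rectangles = []
--     results = []
--
--     def box_fits(box, rectangle):
--         return (box[0] <= rectangle[0] and box[1] <= rectangle[1]) or \
--                (box[1] <= rectangle[0] and box[0] <= rectangle[1])
--
--     for op in operations:
--         if op[0] == 0:  # Create rectangle
--             rectangles.append((op[1], op[2]))
--         else:  # Check if box fits
--             fits_all = all(box_fits((op[1], op[2]), rect) for rect in rectangles)
--             results.append(fits_all)
--
--     return results
-- ===== SOURCE B (Python) =====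
-- def solution(operations):
--     # Alternative algorithm: running minima over all created rectangles of (min-dim, max-dim):
--     # a box (b1,b2) fits every rectangle iff min(b1,b2) <= best[0] and max(b1,b2) <= best[1].
--     best = None
--     results = []
--     for op in operations:
--         lo, hi = (op[1], op[2]) if op[1] <= op[2] else (op[2], op[1])
--         if op[0] == 0:
--             if best is None:
--                 best = (lo, hi)
--             else:
--                 best = (min(best[0], lo), min(best[1], hi))
--         else:
--             results.append(best is None or (lo <= best[0] and hi <= best[1]))
--     return results
-- ===== Notes on version B (the rewrite author's own statement) =====
-- stated objective: alternative
-- what changed: Instead of keeping the list of rectangles and rescanning it on every check, B keeps only the running minimum of the rectangles' normalized (min-dim, max-dim) and answers each check in O(1) from those two numbers, using that a box fits every rectangle iff its sorted dimensions are below both running minima.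
-- outside the precondition, e.g. on solution([[1]]): A returns [True], B raises IndexError
import Mathlib
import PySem

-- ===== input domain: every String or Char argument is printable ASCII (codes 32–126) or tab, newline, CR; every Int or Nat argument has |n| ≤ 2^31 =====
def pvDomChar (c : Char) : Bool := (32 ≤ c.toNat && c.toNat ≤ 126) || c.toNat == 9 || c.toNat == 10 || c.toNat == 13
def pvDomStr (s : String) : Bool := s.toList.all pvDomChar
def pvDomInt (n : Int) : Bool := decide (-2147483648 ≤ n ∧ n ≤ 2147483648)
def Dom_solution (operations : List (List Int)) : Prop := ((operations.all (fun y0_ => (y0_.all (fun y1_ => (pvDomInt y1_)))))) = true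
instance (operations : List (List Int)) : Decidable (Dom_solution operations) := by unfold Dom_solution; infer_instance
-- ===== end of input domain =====

-- B replaces A's per-check rescan of the stored rectangle list by a running minimum of the
-- rectangles' normalized dimensions, answering each check from two numbers (objective: alternative).

-- ===== PORT A =====
def boxFitsA (box rect : Int × Int) : Bool :=
  (decide (box.1 ≤ rect.1) && decide (box.2 ≤ rect.2)) ||
  (decide (box.2 ≤ rect.1) && decide (box.1 ≤ rect.2))

def solution (operations : List (List Int)) : List Bool :=
  (operations.foldl
    (fun (st : List (Int × Int) × List Bool) (op : List Int) =>
      let o0 := PySem.List.pyGetD op 0 0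
      let o1 := PySem.List.pyGetD op 1 0
      let o2 := PySem.List.pyGetD op 2 0
      if o0 == 0 then (st.1 ++ [(o1, o2)], st.2)
      else (st.1, st.2 ++ [st.1.all (fun rect => boxFitsA (o1, o2) rect)]))
    ([], [])).2

-- ===== PORT B =====
def updB (best : Option (Int × Int)) (lo hi : Int) : Option (Int × Int) :=
  match best with
  | none => some (lo, hi)
  | some (a, b) => some (min a lo, min b hi)

def checkB (best : Option (Int × Int)) (lo hi : Int) : Bool :=
  match best with
  | none => true
  | some (a, b) => decide (lo ≤ a) && decide (hi ≤ b)

def solution_alt (operations : List (List Int)) : List Bool :=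
  (operations.foldl
    (fun (st : Option (Int × Int) × List Bool) (op : List Int) =>
      let o1 := PySem.List.pyGetD op 1 0
      let o2 := PySem.List.pyGetD op 2 0
      let lo := min o1 o2
      let hi := max o1 o2
      if PySem.List.pyGetD op 0 0 == 0 then (updB st.1 lo hi, st.2)
      else (st.1, st.2 ++ [checkB st.1 lo hi]))
    (none, [])).2

-- ===== PRECONDITION & SPEC =====
-- Pre_ excludes operations shorter than 3 entries, on which A raises IndexError — except
-- for the accidental case of a check before any rectangle exists, where A's lazy generator
-- never indexes the operation and A returns True while B raises.
def Pre_solution (operations : List (List Int)) : Prop :=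
  ∀ op ∈ operations, 3 ≤ op.length
instance (operations : List (List Int)) : Decidable (Pre_solution operations) := by
  unfold Pre_solution; infer_instance
def pvWitness_solution : List (List Int) := [[0, 3, 5], [1, 4, 2], [1, 4, 6]]

def Spec_solution (operations : List (List Int)) (out : List Bool) : Prop := out = solution_alt operations
instance (operations : List (List Int)) (out : List Bool) : Decidable (Spec_solution operations out) := by unfold Spec_solution; infer_instance

-- ===== CLAIM (what is proved, stated in full; the proofs are below) =====
def Claim_equal_solution : Prop := ∀ (operations : List (List Int)), Dom_solution operations → Pre_solution operations → Spec_solution operations (solution operations)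

-- ===== LEMMAS AND PROOFS =====

-- B's summary of A's rectangle list
def summ (rects : List (Int × Int)) : Option (Int × Int) :=
  rects.foldl (fun acc r => updB acc (min r.1 r.2) (max r.1 r.2)) none

theorem checkB_upd (acc : Option (Int × Int)) (x y b1 b2 : Int) :
    checkB (updB acc (min x y) (max x y)) (min b1 b2) (max b1 b2)
      = (checkB acc (min b1 b2) (max b1 b2) && boxFitsA (b1, b2) (x, y)) := by
  cases acc with
  | none =>
      simp only [updB, checkB, boxFitsA, Bool.true_and]
      rw [Bool.eq_iff_iff]
      simp only [Bool.and_eq_true, Bool.or_eq_true, decide_eq_true_eq]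
      omega
  | some p =>
      obtain ⟨a, b⟩ := p
      simp only [updB, checkB, boxFitsA]
      rw [Bool.eq_iff_iff]
      simp only [Bool.and_eq_true, Bool.or_eq_true, decide_eq_true_eq]
      omega

theorem checkB_summ_aux (rects : List (Int × Int)) (acc : Option (Int × Int)) (b1 b2 : Int) :
    checkB (rects.foldl (fun a r => updB a (min r.1 r.2) (max r.1 r.2)) acc) (min b1 b2) (max b1 b2)
      = (checkB acc (min b1 b2) (max b1 b2) && rects.all (fun r => boxFitsA (b1, b2) r)) := by
  induction rects generalizing acc with
  | nil => simp
  | cons r rs ih =>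
      obtain ⟨x, y⟩ := r
      simp only [List.foldl_cons, List.all_cons, ih, checkB_upd, Bool.and_assoc]

theorem checkB_summ (rects : List (Int × Int)) (b1 b2 : Int) :
    checkB (summ rects) (min b1 b2) (max b1 b2)
      = rects.all (fun r => boxFitsA (b1, b2) r) := by
  simpa [summ, checkB] using checkB_summ_aux rects none b1 b2

theorem fold_inv (operations : List (List Int)) (rects : List (Int × Int)) (res : List Bool) :
    (operations.foldl
      (fun (st : Option (Int × Int) × List Bool) (op : List Int) =>
        let o1 := PySem.List.pyGetD op 1 0
        let o2 := PySem.List.pyGetD op 2 0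
        let lo := min o1 o2
        let hi := max o1 o2
        if PySem.List.pyGetD op 0 0 == 0 then (updB st.1 lo hi, st.2)
        else (st.1, st.2 ++ [checkB st.1 lo hi]))
      (summ rects, res))
    = (fun st : List (Int × Int) × List Bool => (summ st.1, st.2))
      (operations.foldl
        (fun (st : List (Int × Int) × List Bool) (op : List Int) =>
          let o0 := PySem.List.pyGetD op 0 0
          let o1 := PySem.List.pyGetD op 1 0
          let o2 := PySem.List.pyGetD op 2 0
          if o0 == 0 then (st.1 ++ [(o1, o2)], st.2)
          else (st.1, st.2 ++ [st.1.all (fun rect => boxFitsA (o1, o2) rect)]))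
        (rects, res)) := by
  induction operations generalizing rects res with
  | nil => simp
  | cons op ops ih =>
      simp only [List.foldl_cons]
      by_cases h : PySem.List.pyGetD op 0 0 == 0
      · have hs : updB (summ rects) (min (PySem.List.pyGetD op 1 0) (PySem.List.pyGetD op 2 0))
            (max (PySem.List.pyGetD op 1 0) (PySem.List.pyGetD op 2 0))
            = summ (rects ++ [(PySem.List.pyGetD op 1 0, PySem.List.pyGetD op 2 0)]) := by
          simp [summ, List.foldl_append]
        simp only [h, if_true, hs]
        exact ih _ _
      · simp only [h]
        rw [checkB_summ]
        exact ih _ _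

-- ===== VERDICT (by name: the statement is the Claim_ definition above) =====
theorem solution_spec : Claim_equal_solution := by
  intro operations _ _
  show solution operations = solution_alt operations
  unfold solution solution_alt
  rw [show (none : Option (Int × Int)) = summ [] from rfl, fold_inv]
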